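-- pv_equiv track=rewrite | github.com/CHOI-WON-KEUN/python-workspace | time_table.py | shorten_slot_list
-- ===== SOURCE A (Python) =====
-- def shorten_slot_list( slot_list ) :
--     curr_day = None
--     output = [ ]
--     for sl in slot_list :
--         if sl[:-1] != curr_day :
--             curr_day = sl[:-1]
--             output.append(" ")
--             output.append( sl )
--         else :
--             output.append( sl[-1:] )
--     return (''.join(output))[1:]
-- ===== SOURCE B (Python) =====
-- def shorten_slot_list(slot_list):
--     # group-then-join: split into maximal runs sharing the day prefix s[:-1],
--     # render each run as its first slot plus the trailing chars of the rest.
--     parts = []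
--     i = 0
--     n = len(slot_list)
--     while i < n:
--         key = slot_list[i][:-1]
--         j = i + 1
--         while j < n and slot_list[j][:-1] == key:
--             j += 1
--         group = slot_list[i:j]
--         parts.append(group[0] + ''.join(s[-1:] for s in group[1:]))
--         i = j
--     return ' '.join(parts)
-- ===== Notes on version B (the rewrite author's own statement) =====
-- stated objective: idiomatic
-- what changed: Replaces A's single-pass state machine (curr_day flag, leading-space sentinel stripped at the end) by an explicit group-then-join decomposition: split the list into maximal runs sharing the day prefix s[:-1], render each run as first slot plus the trailing characters of the rest, and ' '.join the group strings.
import Mathlib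
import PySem

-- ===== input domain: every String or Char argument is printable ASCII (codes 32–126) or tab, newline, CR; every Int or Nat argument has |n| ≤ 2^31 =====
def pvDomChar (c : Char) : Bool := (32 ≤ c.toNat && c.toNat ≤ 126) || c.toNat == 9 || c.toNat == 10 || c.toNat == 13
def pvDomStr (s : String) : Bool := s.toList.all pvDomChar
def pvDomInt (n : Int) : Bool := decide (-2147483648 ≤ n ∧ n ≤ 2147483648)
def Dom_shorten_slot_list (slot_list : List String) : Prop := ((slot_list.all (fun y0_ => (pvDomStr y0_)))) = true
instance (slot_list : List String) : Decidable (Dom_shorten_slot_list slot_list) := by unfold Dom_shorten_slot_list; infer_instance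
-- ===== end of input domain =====

-- B replaces A's single-pass state machine (with its leading-space strip) by an explicit
-- group-then-join decomposition; objective: simpler/more idiomatic, same cost.

-- ===== PORT A =====
-- A's for-loop: the state is curr_day; the pieces appended to `output` are emitted in order.
def pvGoA (curr : Option (List Char)) : List String → List (List Char)
  | [] => []
  | sl :: rest =>
    if some (PySem.Chars.slice sl.toList none (some (-1))) ≠ curr then
      -- curr_day = sl[:-1]; output.append(" "); output.append(sl)
      [' '] :: sl.toList :: pvGoA (some (PySem.Chars.slice sl.toList none (some (-1)))) rest
    else
      -- output.append(sl[-1:])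
      PySem.Chars.slice sl.toList (some (-1)) none :: pvGoA curr rest

def shorten_slot_list (slot_list : List String) : String :=
  -- (''.join(output))[1:]
  String.ofList (PySem.Chars.slice (PySem.Chars.join [] (pvGoA none slot_list)) (some 1) none)

-- ===== PORT B =====
-- B's day key of a slot: s[:-1]
def pvKeyB (s : String) : List Char := PySem.Chars.slice s.toList none (some (-1))

-- B's grouping loop: peel off the maximal run sharing the first slot's key, recurse on the rest.
def pvGroupByDay : List String → List (List String)
  | [] => []
  | x :: xs =>
    (x :: xs.takeWhile (fun s => pvKeyB s == pvKeyB x)) ::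
      pvGroupByDay (xs.dropWhile (fun s => pvKeyB s == pvKeyB x))
  termination_by lst => lst.length
  decreasing_by
    simpa using Nat.lt_succ_of_le (List.length_dropWhile_le _ _)

-- g[0] + ''.join(s[-1:] for s in g[1:])
def pvGroupStr (g : List String) : List Char :=
  match g with
  | [] => []
  | x :: rest =>
    x.toList ++ PySem.Chars.join [] (rest.map (fun s => PySem.Chars.slice s.toList (some (-1)) none))

def shorten_slot_list_alt (slot_list : List String) : String :=
  -- ' '.join(...)
  String.ofList (PySem.Chars.join [' '] ((pvGroupByDay slot_list).map pvGroupStr))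

-- ===== PRECONDITION & SPEC =====
def Spec_shorten_slot_list (slot_list : List String) (out : String) : Prop := out = shorten_slot_list_alt slot_list
instance (slot_list : List String) (out : String) : Decidable (Spec_shorten_slot_list slot_list out) := by unfold Spec_shorten_slot_list; infer_instance

-- ===== CLAIM (what is proved, stated in full; the proofs are below) =====
def Claim_equal_shorten_slot_list : Prop := ∀ (slot_list : List String), Dom_shorten_slot_list slot_list → Spec_shorten_slot_list slot_list (shorten_slot_list slot_list)

-- ===== LEMMAS AND PROOFS =====

-- ''.join is flatten
theorem pvJoin_nil_eq_flatten (l : List (List Char)) :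
    PySem.Chars.join [] l = l.flatten := by
  induction l with
  | nil => simp [PySem.Chars.join_nil]
  | cons a t ih =>
    cases t with
    | nil => simp [PySem.Chars.join_singleton]
    | cons b u => simp [PySem.Chars.join_cons_cons] at *; simp [ih]

-- within a group, A emits exactly the last characters of the matching slots
theorem pvGoA_in_group (k : List Char) (ys : List String) :
    pvGoA (some k) ys =
      (ys.takeWhile (fun s => pvKeyB s == k)).map
          (fun s => PySem.Chars.slice s.toList (some (-1)) none)
        ++ pvGoA (some k) (ys.dropWhile (fun s => pvKeyB s == k)) := by
  induction ys with
  | nil => simp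
  | cons y t ih =>
    by_cases h : pvKeyB y = k
    · rw [pvGoA]
      simp only [pvKeyB, PySem.Chars.slice_eq_listSlice] at h ih ⊢
      rw [if_neg (by simp [h])]
      simp [h, ih]
    · simp [h]

-- space-prefixed groups, joined, equal A's emitted stream (for a fresh current day)
theorem pvGoA_groups (ys : List String) (c : Option (List Char))
    (hc : ∀ y, ys.head? = some y → some (pvKeyB y) ≠ c) :
    PySem.Chars.join [] (pvGoA c ys) =
      ((pvGroupByDay ys).map (fun g => ' ' :: pvGroupStr g)).flatten := by
  induction hn : ys.length using Nat.strong_induction_on generalizing ys c with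
  | _ n ih =>
  cases ys with
  | nil => simp [pvGoA, PySem.Chars.join_nil, pvGroupByDay]
  | cons y t =>
    have hcy : some (pvKeyB y) ≠ c := hc y rfl
    rw [pvGoA]
    simp only [pvKeyB] at hcy
    rw [if_pos hcy]
    rw [pvGoA_in_group]
    have hlt : (t.dropWhile (fun s => pvKeyB s == pvKeyB y)).length < n := by
      have h1 := List.length_dropWhile_le (fun s => pvKeyB s == pvKeyB y) t
      simp only [List.length_cons] at hn
      omega
    have hhead : ∀ z, (t.dropWhile (fun s => pvKeyB s == pvKeyB y)).head? = some z →
        some (pvKeyB z) ≠ some (pvKeyB y) := by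
      intro z hz
      have h2 := List.head?_dropWhile_not (fun s => pvKeyB s == pvKeyB y) t
      rw [hz] at h2
      simp only at h2
      simp only [beq_eq_false_iff_ne, ne_eq] at h2
      simp [h2]
    have hrec := ih _ hlt (t.dropWhile (fun s => pvKeyB s == pvKeyB y))
      (some (pvKeyB y)) hhead rfl
    rw [pvGroupByDay]
    simp only [List.map_cons, List.flatten_cons, pvGroupStr, pvJoin_nil_eq_flatten] at *
    rw [← hrec]
    simp [pvKeyB]

-- dropping the leading space of the space-prefixed flattening yields ' '.join
theorem pvTail_flatten (gs : List (List Char)) :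
    ((gs.map (fun g => ' ' :: g)).flatten).tail = PySem.Chars.join [' '] gs := by
  induction gs with
  | nil => simp [PySem.Chars.join_nil]
  | cons g t ih =>
    cases t with
    | nil => simp [PySem.Chars.join_singleton]
    | cons h u =>
      rw [PySem.Chars.join_cons_cons, ← ih]
      simp

-- ===== VERDICT (by name: the statement is the Claim_ definition above) =====
theorem shorten_slot_list_spec : Claim_equal_shorten_slot_list := by
  intro slot_list _
  unfold Spec_shorten_slot_list shorten_slot_list shorten_slot_list_alt
  rw [PySem.Chars.slice_eq_listSlice, PySem.List.slice_from_one]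
  rw [pvGoA_groups slot_list none (by intro y _; simp)]
  have hmm : List.map (fun g => ' ' :: pvGroupStr g) (pvGroupByDay slot_list)
      = List.map (fun g => ' ' :: g) (List.map pvGroupStr (pvGroupByDay slot_list)) := by
    simp [List.map_map]
  rw [hmm, pvTail_flatten]
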